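-- pv_equiv track=rewrite | github.com/TaberIV/cs370 | hw8/tripL.py | sb
-- ===== SOURCE A (Python) =====
-- matrix = [[0 for i in range(100)] for j in range(100)]
--
-- def sb(list1, list2, i, j):
--
--     result = []
--
--     if i == 0 or j == 0:
--         return ['']
--
--     if list1[i - 1] == list2[j - 1]:
--         temp = sb(list1, list2, i - 1, j - 1)
--         for k in temp:
--             result.append(k + list1[i - 1])
--     elif matrix[i - 1][j] > matrix[i][j - 1]:
--         result = sb(list1, list2, i - 1, j)
--     elif matrix[i][j - 1] > matrix[i - 1][j]:
--         result = sb(list1, list2, i, j - 1)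
--     else:
--         p1 = sb(list1, list2, i - 1, j)
--         p2 = sb(list1, list2, i, j - 1)
--         result = p1 + p2
--
--     return result
-- ===== SOURCE B (Python) =====
-- matrix = [[0 for i in range(100)] for j in range(100)]
--
-- def sb(list1, list2, i, j):
--     # Bottom-up DP: fill one row of subsequence lists at a time instead of
--     # re-solving overlapping subproblems by exponential recursion.
--     if i == 0 or j == 0:
--         return ['']
--     prev = [[''] for _ in range(j + 1)]
--     for a in range(1, i + 1):
--         cur = [['']]
--         for b in range(1, j + 1):
--             if list1[a - 1] == list2[b - 1]:
--                 cell = [s + list1[a - 1] for s in prev[b - 1]]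
--             elif matrix[a - 1][b] > matrix[a][b - 1]:
--                 cell = prev[b]
--             elif matrix[a][b - 1] > matrix[a - 1][b]:
--                 cell = cur[b - 1]
--             else:
--                 cell = prev[b] + cur[b - 1]
--             cur.append(cell)
--         prev = cur
--     return prev[j]
-- ===== Notes on version B (the rewrite author's own statement) =====
-- stated objective: alternative
-- what changed: Replaced A's top-down recursion (which re-solves the same (i,j) subproblems exponentially often) with a bottom-up dynamic-programming table that computes each (a,b) cell exactly once, keeping only the previous and current row; the result lists themselves can still grow exponentially, so this is not claimed as measurably faster.
-- outside the precondition, e.g. on sb('ab', 'ab', -1, 1): A returns ['a'], B returns ['']; on sb('ab', 'ab', 1, -1): A returns ['a'], B returns ['']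
import Mathlib
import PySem

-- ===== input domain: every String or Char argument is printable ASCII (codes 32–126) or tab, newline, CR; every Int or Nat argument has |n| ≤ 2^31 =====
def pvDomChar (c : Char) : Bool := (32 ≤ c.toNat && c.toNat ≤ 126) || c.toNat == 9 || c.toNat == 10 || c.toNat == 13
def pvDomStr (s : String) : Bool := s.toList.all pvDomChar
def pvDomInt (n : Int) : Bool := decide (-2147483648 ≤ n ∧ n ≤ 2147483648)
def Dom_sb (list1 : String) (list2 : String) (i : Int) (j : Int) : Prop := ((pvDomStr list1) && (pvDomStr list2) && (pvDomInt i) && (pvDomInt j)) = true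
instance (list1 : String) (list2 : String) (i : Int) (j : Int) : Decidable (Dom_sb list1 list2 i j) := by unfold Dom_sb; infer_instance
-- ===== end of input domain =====

-- B replaces A's exponential top-down recursion by a bottom-up DP table filled row by
-- row (same recurrence, each (a,b) cell is computed once): objective = alternative.

-- ===== PORT A =====
-- The module-level 'matrix' is the constant 100×100 all-zero table; matGet models
-- 'matrix[r][c]' exactly: value 0 when both indices are in Python's (wrapping) range,
-- none (= IndexError) otherwise.
def matGet (r : Int) (c : Int) : Option Int :=
  if -100 ≤ r ∧ r < 100 ∧ -100 ≤ c ∧ c < 100 then some 0 else none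

-- Literal transliteration of A over the character lists; where Python raises
-- IndexError (string or matrix index out of range) it returns [] -- those inputs are
-- excluded by Pre_sb.  The Nat 'fuel' argument only bounds the recursion depth so the
-- same recursion is structural (each call strictly decreases i+j, so the fuel sb
-- supplies is never exhausted on inputs where A terminates normally); the dite guard
-- only makes the same indexing total.
def sbCore (l1 : List Char) (l2 : List Char) (fuel : Nat) (i : Int) (j : Int) : List (List Char) :=
  match fuel with
  | 0 => []
  | fuel + 1 =>
    if i = 0 ∨ j = 0 then [[]]
    else if _hin : (-(l1.length : Int) ≤ i - 1 ∧ i - 1 < l1.length) ∧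
                  (-(l2.length : Int) ≤ j - 1 ∧ j - 1 < l2.length) then
      let c1 := PySem.List.pyGetD l1 (i - 1) ' '
      let c2 := PySem.List.pyGetD l2 (j - 1) ' '
      if c1 = c2 then
        (sbCore l1 l2 fuel (i - 1) (j - 1)).map (fun k => k ++ [c1])
      else
        match matGet (i - 1) j, matGet i (j - 1) with
        | some m1, some m2 =>
          if m1 > m2 then sbCore l1 l2 fuel (i - 1) j
          else if m2 > m1 then sbCore l1 l2 fuel i (j - 1)
          else sbCore l1 l2 fuel (i - 1) j ++ sbCore l1 l2 fuel i (j - 1)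
        | _, _ => []
    else []

def sb (list1 : String) (list2 : String) (i : Int) (j : Int) : List String :=
  (sbCore list1.toList list2.toList (i.toNat + j.toNat + 1) i j).map (fun k => String.ofList k)

-- ===== PORT B =====
-- Transliteration of Source B: rows of DP cells, inner/outer Python for-loops as foldl
-- over pyRange; Python's in-loop indexing ported with pyGetD (in range on Pre_sb).
def sbAltCore (l1 : List Char) (l2 : List Char) (i : Int) (j : Int) : List (List Char) :=
  if i = 0 ∨ j = 0 then [[]]
  else
    let prev0 : List (List (List Char)) := (PySem.List.pyRange 0 (j + 1) 1).map (fun _ => [[]])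
    let prev := (PySem.List.pyRange 1 (i + 1) 1).foldl (fun prev a =>
        (PySem.List.pyRange 1 (j + 1) 1).foldl (fun cur b =>
          let c1 := PySem.List.pyGetD l1 (a - 1) ' '
          let c2 := PySem.List.pyGetD l2 (b - 1) ' '
          let cell :=
            if c1 = c2 then
              (PySem.List.pyGetD prev (b - 1) []).map (fun s => s ++ [c1])
            else
              match matGet (a - 1) b, matGet a (b - 1) with
              | some m1, some m2 =>
                if m1 > m2 then PySem.List.pyGetD prev b []
                else if m2 > m1 then PySem.List.pyGetD cur (b - 1) []
                else PySem.List.pyGetD prev b [] ++ PySem.List.pyGetD cur (b - 1) []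
              | _, _ => []
          cur ++ [cell]) [[[]]]
      ) prev0
    PySem.List.pyGetD prev j []

def sb_alt (list1 : String) (list2 : String) (i : Int) (j : Int) : List String :=
  (sbAltCore list1.toList list2.toList i j).map (fun k => String.ofList k)

-- ===== PRECONDITION & SPEC =====
-- A raises IndexError when i or j exceeds its string's length on a mismatch path, and
-- 'matrix' is only 100×100, so indices above 99 raise whenever two compared characters
-- differ; recursions entered with BOTH i and j nonzero and one of them negative reach
-- A's base case only through Python's negative-index wraparound, an artefact of A's
-- indexing.  Pre_sb therefore admits the base rows (i = 0 or j = 0, where A returns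
-- [''] immediately) plus 1 ≤ i ≤ min(len1,99) and 1 ≤ j ≤ min(len2,99); on a few
-- excluded inputs A still returns (see the claim's cites).
def Pre_sb (list1 : String) (list2 : String) (i : Int) (j : Int) : Prop :=
  (i = 0 ∨ j = 0) ∨
  (0 ≤ i ∧ i ≤ (list1.toList.length : Int) ∧ i ≤ 99 ∧
   0 ≤ j ∧ j ≤ (list2.toList.length : Int) ∧ j ≤ 99)
instance (list1 : String) (list2 : String) (i : Int) (j : Int) : Decidable (Pre_sb list1 list2 i j) := by unfold Pre_sb; infer_instance

def pvWitness_sb : String × String × Int × Int := ("abcd", "badc", 4, 4)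

def Spec_sb (list1 : String) (list2 : String) (i : Int) (j : Int) (out : List String) : Prop := out = sb_alt list1 list2 i j
instance (list1 : String) (list2 : String) (i : Int) (j : Int) (out : List String) : Decidable (Spec_sb list1 list2 i j out) := by unfold Spec_sb; infer_instance

-- ===== CLAIM (what is proved, stated in full; the proofs are below) =====
def Claim_equal_sb : Prop := ∀ (list1 : String) (list2 : String) (i : Int) (j : Int), Dom_sb list1 list2 i j → Pre_sb list1 list2 i j → Spec_sb list1 list2 i j (sb list1 list2 i j)

-- ===== LEMMAS AND PROOFS =====

-- A's recursion at its canonical fuel (the fuel sb supplies): every cell has one value.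
def sbF (l1 : List Char) (l2 : List Char) (i : Int) (j : Int) : List (List Char) :=
  sbCore l1 l2 (i.toNat + j.toNat + 1) i j

-- The fuel is irrelevant as long as it exceeds the recursion depth i+j.
theorem sbCore_fuel (l1 l2 : List Char) : ∀ (n f g : Nat) (i j : Int), 0 ≤ i → 0 ≤ j →
    i.toNat + j.toNat ≤ n → n < f → n < g → sbCore l1 l2 f i j = sbCore l1 l2 g i j := by
  intro n
  induction n with
  | zero =>
    intro f g i j hi hj hn hf hg
    match f, g with
    | f' + 1, g' + 1 =>
      have h0 : i = 0 ∨ j = 0 := by omega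
      simp only [sbCore, if_pos h0]
  | succ m ih =>
    intro f g i j hi hj hn hf hg
    match f, g with
    | f' + 1, g' + 1 =>
      simp only [sbCore]
      by_cases h0 : i = 0 ∨ j = 0
      · rw [if_pos h0, if_pos h0]
      · rw [if_neg h0, if_neg h0]
        by_cases hin : (-(l1.length : Int) ≤ i - 1 ∧ i - 1 < l1.length) ∧
                       (-(l2.length : Int) ≤ j - 1 ∧ j - 1 < l2.length)
        · rw [dif_pos hin, dif_pos hin]
          have h1 : sbCore l1 l2 f' (i - 1) (j - 1) = sbCore l1 l2 g' (i - 1) (j - 1) :=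
            ih f' g' (i - 1) (j - 1) (by omega) (by omega) (by omega) (by omega) (by omega)
          have h2 : sbCore l1 l2 f' (i - 1) j = sbCore l1 l2 g' (i - 1) j :=
            ih f' g' (i - 1) j (by omega) hj (by omega) (by omega) (by omega)
          have h3 : sbCore l1 l2 f' i (j - 1) = sbCore l1 l2 g' i (j - 1) :=
            ih f' g' i (j - 1) hi (by omega) (by omega) (by omega) (by omega)
          simp only [h1, h2, h3]
        · rw [dif_neg hin, dif_neg hin]

-- A's base row/column: any cell with i = 0 or j = 0 is [[]].
theorem sbF_zero_left (l1 l2 : List Char) (b : Int) : sbF l1 l2 0 b = [[]] := by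
  simp [sbF, sbCore]

theorem sbF_zero_right (l1 l2 : List Char) (a : Int) : sbF l1 l2 a 0 = [[]] := by
  simp [sbF, sbCore]

-- One unfolding of A in the interior of the admitted region: the matrix is all zeros,
-- so the two 'elif' comparisons are false and the recurrence is char-equal / concat.
theorem sbF_unfold (l1 l2 : List Char) (a b : Int)
    (ha1 : 1 ≤ a) (ha2 : a ≤ (l1.length : Int)) (ha3 : a ≤ 99)
    (hb1 : 1 ≤ b) (hb2 : b ≤ (l2.length : Int)) (hb3 : b ≤ 99) :
    sbF l1 l2 a b =
      if PySem.List.pyGetD l1 (a - 1) ' ' = PySem.List.pyGetD l2 (b - 1) ' ' then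
        (sbF l1 l2 (a - 1) (b - 1)).map (fun k => k ++ [PySem.List.pyGetD l1 (a - 1) ' '])
      else sbF l1 l2 (a - 1) b ++ sbF l1 l2 a (b - 1) := by
  simp only [sbF, sbCore]
  have h0 : ¬ (a = 0 ∨ b = 0) := by omega
  have hin : (-(l1.length : Int) ≤ a - 1 ∧ a - 1 < l1.length) ∧
             (-(l2.length : Int) ≤ b - 1 ∧ b - 1 < l2.length) := by omega
  rw [if_neg h0, dif_pos hin]
  have hm1 : matGet (a - 1) b = some 0 := by unfold matGet; rw [if_pos (by omega)]
  have hm2 : matGet a (b - 1) = some 0 := by unfold matGet; rw [if_pos (by omega)]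
  have e1 : sbCore l1 l2 (a.toNat + b.toNat) (a - 1) (b - 1)
      = sbCore l1 l2 ((a - 1).toNat + (b - 1).toNat + 1) (a - 1) (b - 1) :=
    sbCore_fuel l1 l2 ((a - 1).toNat + (b - 1).toNat) _ _ _ _ (by omega) (by omega)
      (by omega) (by omega) (by omega)
  have e2 : sbCore l1 l2 (a.toNat + b.toNat) (a - 1) b
      = sbCore l1 l2 ((a - 1).toNat + b.toNat + 1) (a - 1) b :=
    sbCore_fuel l1 l2 ((a - 1).toNat + b.toNat) _ _ _ _ (by omega) (by omega)
      (by omega) (by omega) (by omega)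
  have e3 : sbCore l1 l2 (a.toNat + b.toNat) a (b - 1)
      = sbCore l1 l2 (a.toNat + (b - 1).toNat + 1) a (b - 1) :=
    sbCore_fuel l1 l2 (a.toNat + (b - 1).toNat) _ _ _ _ (by omega) (by omega)
      (by omega) (by omega) (by omega)
  simp only [e1, e2, e3]
  simp only [hm1, hm2]
  split
  · rfl
  · rw [if_neg (lt_irrefl (0 : Int)), if_neg (lt_irrefl (0 : Int))]
    rfl

-- The inner loop of B, starting from row (a-1) of A-values, produces row a of A-values.
theorem inner_row (l1 l2 : List Char) (j a : Int) (n : Nat)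
    (ha1 : 1 ≤ a) (ha2 : a ≤ (l1.length : Int)) (ha3 : a ≤ 99)
    (hj2 : j ≤ (l2.length : Int)) (hj3 : j ≤ 99) (hn : (n : Int) ≤ j) :
    (PySem.List.pyRange 1 ((n : Int) + 1) 1).foldl (fun cur b =>
      let c1 := PySem.List.pyGetD l1 (a - 1) ' '
      let c2 := PySem.List.pyGetD l2 (b - 1) ' '
      let cell :=
        if c1 = c2 then
          (PySem.List.pyGetD ((PySem.List.pyRange 0 (j + 1) 1).map (fun b' => sbF l1 l2 (a - 1) b')) (b - 1) []).map (fun s => s ++ [c1])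
        else
          match matGet (a - 1) b, matGet a (b - 1) with
          | some m1, some m2 =>
            if m1 > m2 then PySem.List.pyGetD ((PySem.List.pyRange 0 (j + 1) 1).map (fun b' => sbF l1 l2 (a - 1) b')) b []
            else if m2 > m1 then PySem.List.pyGetD cur (b - 1) []
            else PySem.List.pyGetD ((PySem.List.pyRange 0 (j + 1) 1).map (fun b' => sbF l1 l2 (a - 1) b')) b [] ++ PySem.List.pyGetD cur (b - 1) []
          | _, _ => []
      cur ++ [cell]) [[[]]]
    = (PySem.List.pyRange 0 ((n : Int) + 1) 1).map (fun b => sbF l1 l2 a b) := by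
  induction n with
  | zero =>
    rw [PySem.List.pyRange_one_eq_nil (a := 1) (b := ((0 : Nat) : Int) + 1) (by omega),
        PySem.List.pyRange_one_cons (a := 0) (b := ((0 : Nat) : Int) + 1) (by omega),
        PySem.List.pyRange_one_eq_nil (a := 0 + 1) (b := ((0 : Nat) : Int) + 1) (by omega)]
    simp [sbF_zero_right]
  | succ m ih =>
    have hcast : ((m : Int) + 1 : Int) = ((m + 1 : Nat) : Int) := by push_cast; ring
    have hsplit : PySem.List.pyRange 1 (((m + 1 : Nat) : Int) + 1) 1
        = PySem.List.pyRange 1 (((m : Nat) : Int) + 1) 1 ++ [((m : Nat) : Int) + 1] := by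
      rw [← hcast, PySem.List.pyRange_one_succ_right (by omega)]
    rw [hsplit, List.foldl_append, ih (by push_cast at hn ⊢; omega)]
    simp only [List.foldl_cons, List.foldl_nil]
    have hb : ((m : Int) + 1) - 1 = (m : Int) := by ring
    have hget1 : PySem.List.pyGetD ((PySem.List.pyRange 0 (j + 1) 1).map (fun b' => sbF l1 l2 (a - 1) b')) ((m : Int) + 1 - 1) []
        = sbF l1 l2 (a - 1) (m : Int) := by
      rw [hb]; exact PySem.List.pyGetD_map_pyRange_of_nonneg _ _ _ _ (by omega) (by push_cast at hn ⊢; omega)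
    have hget2 : PySem.List.pyGetD ((PySem.List.pyRange 0 (j + 1) 1).map (fun b' => sbF l1 l2 (a - 1) b')) ((m : Int) + 1) []
        = sbF l1 l2 (a - 1) ((m : Int) + 1) :=
      PySem.List.pyGetD_map_pyRange_of_nonneg _ _ _ _ (by omega) (by push_cast at hn ⊢; omega)
    have hget3 : PySem.List.pyGetD ((PySem.List.pyRange 0 ((m : Int) + 1) 1).map (fun b => sbF l1 l2 a b)) ((m : Int) + 1 - 1) []
        = sbF l1 l2 a (m : Int) := by
      rw [hb]; exact PySem.List.pyGetD_map_pyRange_of_nonneg _ _ _ _ (by omega) (by omega)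
    have hm1 : matGet (a - 1) ((m : Int) + 1) = some 0 := by
      unfold matGet; rw [if_pos (by push_cast at hn; omega)]
    have hm2 : matGet a ((m : Int) + 1 - 1) = some 0 := by
      unfold matGet; rw [if_pos (by push_cast at hn; omega)]
    have hcell : sbF l1 l2 a ((m : Int) + 1) =
        if PySem.List.pyGetD l1 (a - 1) ' ' = PySem.List.pyGetD l2 (((m : Int) + 1) - 1) ' ' then
          (sbF l1 l2 (a - 1) (((m : Int) + 1) - 1)).map (fun k => k ++ [PySem.List.pyGetD l1 (a - 1) ' '])
        else sbF l1 l2 (a - 1) ((m : Int) + 1) ++ sbF l1 l2 a (((m : Int) + 1) - 1) :=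
      sbF_unfold l1 l2 a ((m : Int) + 1) ha1 ha2 ha3 (by omega) (by push_cast at hn; omega) (by push_cast at hn; omega)
    have hmap : PySem.List.pyRange 0 (((m : Nat) : Int) + 1 + 1) 1
        = PySem.List.pyRange 0 (((m : Nat) : Int) + 1) 1 ++ [((m : Nat) : Int) + 1] :=
      PySem.List.pyRange_one_succ_right (by omega)
    push_cast
    rw [hmap, List.map_append, List.map_cons, List.map_nil]
    congr 1
    simp only [hget1, hget2, hget3, hm1, hm2]
    rw [hcell, hb]
    split
    · rfl
    · simp

-- The outer loop of B produces row i of A-values.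
theorem outer_rows (l1 l2 : List Char) (i j : Int) (n : Nat)
    (hi2 : i ≤ (l1.length : Int)) (hi3 : i ≤ 99) (hj0 : 0 ≤ j)
    (hj2 : j ≤ (l2.length : Int)) (hj3 : j ≤ 99) (hn : (n : Int) ≤ i) :
    (PySem.List.pyRange 1 ((n : Int) + 1) 1).foldl (fun prev a =>
        (PySem.List.pyRange 1 (j + 1) 1).foldl (fun cur b =>
          let c1 := PySem.List.pyGetD l1 (a - 1) ' '
          let c2 := PySem.List.pyGetD l2 (b - 1) ' '
          let cell :=
            if c1 = c2 then
              (PySem.List.pyGetD prev (b - 1) []).map (fun s => s ++ [c1])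
            else
              match matGet (a - 1) b, matGet a (b - 1) with
              | some m1, some m2 =>
                if m1 > m2 then PySem.List.pyGetD prev b []
                else if m2 > m1 then PySem.List.pyGetD cur (b - 1) []
                else PySem.List.pyGetD prev b [] ++ PySem.List.pyGetD cur (b - 1) []
              | _, _ => []
          cur ++ [cell]) [[[]]]
      ) ((PySem.List.pyRange 0 (j + 1) 1).map (fun _ => [[]]))
    = (PySem.List.pyRange 0 (j + 1) 1).map (fun b => sbF l1 l2 (n : Int) b) := by
  induction n with
  | zero =>
    rw [PySem.List.pyRange_one_eq_nil (a := 1) (b := ((0 : Nat) : Int) + 1) (by omega)]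
    simp only [List.foldl_nil, Nat.cast_zero]
    congr 1
  | succ m ih =>
    have hsplit : PySem.List.pyRange 1 (((m + 1 : Nat) : Int) + 1) 1
        = PySem.List.pyRange 1 (((m : Nat) : Int) + 1) 1 ++ [((m : Nat) : Int) + 1] := by
      have hc : (((m + 1 : Nat) : Int) + 1) = (((m : Nat) : Int) + 1) + 1 := by push_cast; ring
      rw [hc, PySem.List.pyRange_one_succ_right (by omega)]
    rw [hsplit, List.foldl_append, ih (by push_cast at hn ⊢; omega)]
    simp only [List.foldl_cons, List.foldl_nil]
    have ha := inner_row l1 l2 j ((m : Int) + 1) j.toNat (by omega)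
      (by push_cast at hn; omega) (by push_cast at hn; omega) hj2 hj3 (by omega)
    have hjj : ((j.toNat : Int)) = j := by omega
    rw [hjj] at ha
    rw [show (((m + 1 : Nat) : Int)) = (m : Int) + 1 by push_cast; ring]
    simp only [show ((m : Int) + 1 - 1) = (m : Int) from by ring] at ha ⊢
    exact ha

-- ===== VERDICT (by name: the statement is the Claim_ definition above) =====
theorem sb_spec : Claim_equal_sb := by
  intro list1 list2 i j _ hpre
  unfold Spec_sb sb sb_alt
  have hsbF : sbCore list1.toList list2.toList (i.toNat + j.toNat + 1) i j
      = sbF list1.toList list2.toList i j := rfl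
  rw [hsbF]
  congr 1
  unfold sbAltCore
  by_cases h0 : i = 0 ∨ j = 0
  · rw [if_pos h0]
    rcases h0 with h | h
    · rw [h, sbF_zero_left]
    · rw [h, sbF_zero_right]
  · obtain ⟨hi1, hi2, hi3, hj1, hj2, hj3⟩ : 0 ≤ i ∧ i ≤ (list1.toList.length : Int) ∧ i ≤ 99 ∧
        0 ≤ j ∧ j ≤ (list2.toList.length : Int) ∧ j ≤ 99 := by
      rcases hpre with h | h
      · exact absurd h h0
      · exact h
    rw [if_neg h0]
    simp only []
    have houter := outer_rows list1.toList list2.toList i j i.toNat hi2 hi3 hj1 hj2 hj3 (by omega)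
    have hii : ((i.toNat : Int)) = i := by omega
    rw [hii] at houter
    rw [houter]
    exact (PySem.List.pyGetD_map_pyRange_of_nonneg
      (fun b => sbF list1.toList list2.toList i b) (j + 1) j [] (by omega) (by omega)).symm
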